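-- pv_equiv track=rewrite | github.com/theri6v/CodeSprintSolutions | GeekForGeek/Problem Of The Day/Remaining String.py | printString
-- ===== SOURCE A (Python) =====
-- def printString(s, ch, count):
--     c=0
--     for i in range(len(s)):
--         if c==count:
--             return s[i:]
--         if s[i]==ch:
--             c+=1
--     return ""
-- ===== SOURCE B (Python) =====
-- def printString(s, ch, count):
--     positions = [i for i, x in enumerate(s) if x == ch]
--     if count == 0:
--         return s
--     if 1 <= count <= len(positions):
--         return s[positions[count - 1] + 1:]
--     return ""
-- ===== Notes on version B (the rewrite author's own statement) =====
-- stated objective: simpler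
-- what changed: Replaces the early-return scan with a mutable counter by an index-building pass (positions of ch) followed by a direct indexed slice, keeping the == comparison so empty/multi-char ch behave identically.
import Mathlib
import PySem

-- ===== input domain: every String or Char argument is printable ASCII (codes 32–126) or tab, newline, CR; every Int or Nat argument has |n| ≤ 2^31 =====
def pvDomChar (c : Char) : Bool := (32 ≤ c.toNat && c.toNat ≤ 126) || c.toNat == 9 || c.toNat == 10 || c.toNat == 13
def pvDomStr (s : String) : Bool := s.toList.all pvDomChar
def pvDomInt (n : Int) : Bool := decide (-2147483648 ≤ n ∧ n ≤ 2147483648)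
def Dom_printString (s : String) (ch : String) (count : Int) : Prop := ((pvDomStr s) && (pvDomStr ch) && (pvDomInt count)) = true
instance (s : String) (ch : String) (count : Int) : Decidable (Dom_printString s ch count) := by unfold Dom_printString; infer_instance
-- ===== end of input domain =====

-- B replaces A's early-return scan with a counter by a positions-of-ch pass plus a direct indexed slice (objective: simpler).


-- ===== PORT A =====
-- the for-loop: recursion over the remaining suffix, carrying the counter c; s[i:] is the current suffix
def pvAGo (rest : List Char) (ch : String) (count : Int) (c : Int) : String :=
  match rest with
  | [] => ""
  | x :: xs =>
    if c == count then String.mk (x :: xs)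
    else if String.mk [x] == ch then pvAGo xs ch count (c + 1)
    else pvAGo xs ch count c

def printString (s : String) (ch : String) (count : Int) : String :=
  pvAGo s.toList ch count 0

-- ===== PORT B =====
-- [i for i, x in enumerate(s) if x == ch]: structural recursion, indices of the tail shifted by one
def pvPositions (cs : List Char) (ch : String) : List Nat :=
  match cs with
  | [] => []
  | x :: xs =>
    if String.mk [x] == ch then 0 :: (pvPositions xs ch).map (· + 1)
    else (pvPositions xs ch).map (· + 1)

def pvAltCore (cs : List Char) (ch : String) (count : Int) : String :=
  let positions := pvPositions cs ch
  if count == 0 then String.mk cs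
  else if 1 ≤ count ∧ count ≤ (positions.length : Int) then
    String.mk (cs.drop (positions.getD (count - 1).toNat 0 + 1))
  else ""

def printString_alt (s : String) (ch : String) (count : Int) : String :=
  pvAltCore s.toList ch count

-- ===== PRECONDITION & SPEC =====
def Spec_printString (s : String) (ch : String) (count : Int) (out : String) : Prop := out = printString_alt s ch count
instance (s : String) (ch : String) (count : Int) (out : String) : Decidable (Spec_printString s ch count out) := by unfold Spec_printString; infer_instance

-- ===== CLAIM (what is proved, stated in full; the proofs are below) =====
def Claim_equal_printString : Prop := ∀ (s : String) (ch : String) (count : Int), Dom_printString s ch count → Spec_printString s ch count (printString s ch count)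

-- ===== LEMMAS AND PROOFS =====

-- only the difference count - c matters in A's loop
theorem pvAGo_shift (rest : List Char) (ch : String) : ∀ (count c : Int),
    pvAGo rest ch count c = pvAGo rest ch (count - c) 0 := by
  induction rest with
  | nil => intro count c; rfl
  | cons x xs ih =>
    intro count c
    simp only [pvAGo]
    have hb : (c == count) = (0 == count - c) := by
      rcases eq_or_ne c count with h | h
      · subst h; simp
      · rw [beq_eq_false_iff_ne.mpr h,
            beq_eq_false_iff_ne.mpr (show (0:Int) ≠ count - c by omega)]
    rw [hb]
    by_cases h0 : ((0:Int) == count - c) = true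
    · rw [if_pos h0, if_pos h0]
    · rw [if_neg h0, if_neg h0]
      by_cases hm : (String.mk [x] == ch) = true
      · rw [if_pos hm, if_pos hm, ih count (c + 1), ih (count - c) (0 + 1)]
        congr 1; omega
      · rw [if_neg hm, if_neg hm, ih count c, ih (count - c) 0]

theorem pvGetD_map_add_one (l : List Nat) (j : Nat) (hj : j < l.length) :
    (l.map (· + 1)).getD j 0 = l.getD j 0 + 1 := by
  simp [List.getD_eq_getElem?_getD, List.getElem?_map, List.getElem?_eq_getElem hj]

theorem pvMain (ch : String) (cs : List Char) : ∀ (count : Int),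
    pvAGo cs ch count 0 = pvAltCore cs ch count := by
  induction cs with
  | nil =>
    intro count
    simp only [pvAGo, pvAltCore, pvPositions]
    split_ifs <;> rfl
  | cons x xs ih =>
    intro count
    simp only [pvAGo]
    by_cases h0 : count = 0
    · subst h0; simp [pvAltCore]
    · have h0b : ¬(((0:Int) == count) = true) := by simp; omega
      have h0c : ¬((count == (0:Int)) = true) := by simp; omega
      rw [if_neg h0b]
      by_cases hm : (String.mk [x] == ch) = true
      · -- x matches ch
        rw [if_pos hm, pvAGo_shift xs ch count (0 + 1),
            show count - (0 + 1) = count - 1 from by omega, ih (count - 1)]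
        simp only [pvAltCore, pvPositions, if_pos hm]
        rw [if_neg h0c]
        by_cases h1 : count = 1
        · subst h1; simp
        · have hc1 : ¬(((count - 1 : Int) == 0) = true) := by simp; omega
          rw [if_neg hc1]
          by_cases hr : 1 ≤ count - 1 ∧ count - 1 ≤ ((pvPositions xs ch).length : Int)
          · have hr' : 1 ≤ count ∧ count ≤ (((0 :: (pvPositions xs ch).map (· + 1)).length : Nat) : Int) := by
              simp only [List.length_cons, List.length_map]; push_cast; omega
            rw [if_pos hr, if_pos hr']
            have hk : (count - 1).toNat = ((count - 1 - 1).toNat) + 1 := by omega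
            rw [hk]
            simp only [List.getD_cons_succ]
            have hjlt : (count - 1 - 1).toNat < (pvPositions xs ch).length := by omega
            rw [pvGetD_map_add_one _ _ hjlt, List.drop_succ_cons]
          · have hr' : ¬ (1 ≤ count ∧ count ≤ (((0 :: (pvPositions xs ch).map (· + 1)).length : Nat) : Int)) := by
              simp only [List.length_cons, List.length_map]; push_cast; push_cast at hr; omega
            rw [if_neg hr, if_neg hr']
      · -- x does not match ch
        rw [if_neg hm, ih count]
        simp only [pvAltCore, pvPositions, if_neg hm]
        rw [if_neg h0c, if_neg h0c]
        by_cases hr : 1 ≤ count ∧ count ≤ ((pvPositions xs ch).length : Int)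
        · have hr' : 1 ≤ count ∧ count ≤ ((((pvPositions xs ch).map (· + 1)).length : Nat) : Int) := by
            simp only [List.length_map]; exact hr
          rw [if_pos hr, if_pos hr']
          have hjlt : (count - 1).toNat < (pvPositions xs ch).length := by omega
          rw [pvGetD_map_add_one _ _ hjlt, List.drop_succ_cons]
        · have hr' : ¬ (1 ≤ count ∧ count ≤ ((((pvPositions xs ch).map (· + 1)).length : Nat) : Int)) := by
            simp only [List.length_map]; exact hr
          rw [if_neg hr, if_neg hr']

-- ===== VERDICT (by name: the statement is the Claim_ definition above) =====
theorem printString_spec : Claim_equal_printString := by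
  intro s ch count _
  unfold Spec_printString printString printString_alt
  exact pvMain ch s.toList count
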